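-- pv_equiv track=rewrite | github.com/Global-Health-Labs/NAATOS-V2-py32 | python/EncodePWM.py | distribute_bits
-- ===== SOURCE A (Python) =====
-- def distribute_bits(n: int) -> int:
--     """
--     Distributes N ones evenly across a 256-bit wide bitfield.
--
--     Parameters:
--     - n (int): The number of ones to distribute (0-256).
--
--     Returns:
--     - int: A 256-bit number with N ones distributed across the bitfield.
--     """
--     if not (0 <= n <= 256):
--         raise ValueError("Input must be between 0 and 256 (inclusive).")
--
--     bitfield = 0
--     if n == 0:
--         return bitfield
--
--     # Calculate the spacing between the ones
--     step = 256 // n  # Integer division to determine spacing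
--     for i in range(n):
--         bitfield |= (1 << (i * step))
--
--     return bitfield
-- ===== SOURCE B (Python) =====
-- def distribute_bits(n: int) -> int:
--     if not (0 <= n <= 256):
--         raise ValueError("Input must be between 0 and 256 (inclusive).")
--     if n == 0:
--         return 0
--     step = 256 // n
--     r = 1 << step
--     return (r**n - 1) // (r - 1)
-- ===== Notes on version B (the rewrite author's own statement) =====
-- stated objective: faster
-- what changed: Replaces the n-iteration shift-and-OR accumulation loop with a direct closed-form geometric-series expression (r**n - 1) // (r - 1) where r is two to the step width, computing the same bitfield without any loop.
import Mathlib
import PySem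

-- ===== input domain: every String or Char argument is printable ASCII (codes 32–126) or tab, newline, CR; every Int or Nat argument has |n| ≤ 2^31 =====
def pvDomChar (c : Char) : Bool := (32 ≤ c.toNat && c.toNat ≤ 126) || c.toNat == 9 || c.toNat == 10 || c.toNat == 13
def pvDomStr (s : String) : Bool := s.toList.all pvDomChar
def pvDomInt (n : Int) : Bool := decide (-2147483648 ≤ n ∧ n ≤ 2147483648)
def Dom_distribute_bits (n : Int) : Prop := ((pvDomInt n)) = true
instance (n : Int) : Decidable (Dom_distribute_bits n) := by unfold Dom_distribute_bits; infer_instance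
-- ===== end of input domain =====

-- B replaces A's n-step shift/OR loop by the closed-form geometric series (r^n - 1) // (r - 1),
-- r = 2^step; behaviour identical on the accepted range (A raises ValueError outside it).

-- ===== PORT A =====
def distribute_bits (n : Int) : Int :=
  if ¬ (0 ≤ n ∧ n ≤ 256) then 0      -- Python raises ValueError here; excluded by Pre_
  else if n = 0 then 0
  else
    (PySem.List.pyRange 0 n 1).foldl
      (fun bitfield i =>
        PySem.Int.bor bitfield ((1 : Int) <<< (i * PySem.Int.floordiv 256 n).toNat)) 0

-- ===== PORT B =====
def distribute_bits_alt (n : Int) : Int :=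
  if ¬ (0 ≤ n ∧ n ≤ 256) then 0      -- Python raises ValueError here; excluded by Pre_
  else if n = 0 then 0
  else
    PySem.Int.floordiv
      (((1 : Int) <<< (PySem.Int.floordiv 256 n).toNat) ^ n.toNat - 1)
      (((1 : Int) <<< (PySem.Int.floordiv 256 n).toNat) - 1)

-- ===== PRECONDITION & SPEC =====
-- A raises ValueError outside 0..256; exactly those inputs are excluded.
def Pre_distribute_bits (n : Int) : Prop := 0 ≤ n ∧ n ≤ 256
instance (n : Int) : Decidable (Pre_distribute_bits n) := by unfold Pre_distribute_bits; infer_instance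
def pvWitness_distribute_bits : Int := (5)

def Spec_distribute_bits (n : Int) (out : Int) : Prop := out = distribute_bits_alt n
instance (n : Int) (out : Int) : Decidable (Spec_distribute_bits n out) := by unfold Spec_distribute_bits; infer_instance

-- ===== CLAIM (what is proved, stated in full; the proofs are below) =====
def Claim_equal_distribute_bits : Prop := ∀ (n : Int), Dom_distribute_bits n → Pre_distribute_bits n → Spec_distribute_bits n (distribute_bits n)

-- ===== LEMMAS AND PROOFS =====

-- A's loop over j < N ORs in the disjoint bits 2^(j*s); since each new bit is above the
-- accumulated value, the OR is a sum, and that sum stays below 2^(N*s).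
theorem fold_bor_eq_sum (s : Nat) (hs : 1 ≤ s) (N : Nat) :
    ((List.range N).foldl (fun (b : Int) (j : Nat) => PySem.Int.bor b ((1 : Int) <<< (j * s))) 0
      = ((∑ j ∈ Finset.range N, 2 ^ (j * s) : Nat) : Int))
    ∧ (∑ j ∈ Finset.range N, 2 ^ (j * s) : Nat) < 2 ^ (N * s) := by
  induction N with
  | zero => simp
  | succ N ih =>
    obtain ⟨hfold, hlt⟩ := ih
    constructor
    · rw [List.range_succ, List.foldl_append, hfold, Finset.sum_range_succ]
      simp only [List.foldl]
      rw [show (1 : Int) <<< (N * s) = ((2 ^ (N * s) : Nat) : Int) by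
            simp [Int.shiftLeft_eq]]
      rw [PySem.Int.bor_natCast]
      congr 1
      rw [Nat.lor_comm]
      have := (Nat.two_pow_add_eq_or_of_lt hlt 1)
      rw [mul_one] at this
      omega
    · rw [Finset.sum_range_succ]
      have h1 : 2 ^ (N * s) + 2 ^ (N * s) = 2 ^ (N * s + 1) := by ring
      have h2 : 2 ^ (N * s + 1) ≤ 2 ^ ((N + 1) * s) := by
        apply Nat.pow_le_pow_right (by norm_num)
        nlinarith
      omega

-- the geometric series: (r^N - 1) // (r - 1) = ∑ j < N, r^j for r ≥ 2
theorem geom_div (r : Int) (hr : 2 ≤ r) (N : Nat) :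
    PySem.Int.floordiv (r ^ N - 1) (r - 1) = ∑ j ∈ Finset.range N, r ^ j := by
  rw [PySem.Int.floordiv_eq_ediv_of_pos (by omega)]
  rw [← geom_sum_mul r N]
  exact Int.mul_ediv_cancel _ (by omega)

theorem main_pos (n : Int) (h1 : 1 ≤ n) (h256 : n ≤ 256) :
    distribute_bits n = distribute_bits_alt n := by
  have hpre : ¬ ¬ (0 ≤ n ∧ n ≤ 256) := by omega
  have hne : ¬ (n = 0) := by omega
  set N := n.toNat with hN
  have hn : n = (N : Int) := by omega
  have hN1 : 1 ≤ N := by omega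
  have hN256 : N ≤ 256 := by omega
  set s := 256 / N with hs
  have hs1 : 1 ≤ s := Nat.one_le_div_iff (by omega) |>.mpr hN256
  have hstep : PySem.Int.floordiv 256 n = (s : Int) := by
    rw [hn]
    exact_mod_cast PySem.Int.floordiv_natCast 256 N
  simp only [distribute_bits, distribute_bits_alt, if_neg hpre, if_neg hne, hstep,
    Int.toNat_natCast]
  -- left side: turn the pyRange fold into a List.range fold over Nat
  rw [hn, PySem.List.pyRange_zero_natCast, List.foldl_map]
  have hcast : ∀ (b : Int) (j : Nat),
      PySem.Int.bor b ((1 : Int) <<< (((j : Int) * (s : Int)).toNat)) =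
      PySem.Int.bor b ((1 : Int) <<< (j * s)) := by
    intro b j
    rw [← Nat.cast_mul, Int.toNat_natCast]
  simp only [hcast]
  rw [(fold_bor_eq_sum s hs1 N).1]
  -- right side: closed form = geometric sum
  have hr : (2 : Int) ≤ (1 : Int) <<< s := by
    rw [show (1 : Int) <<< s = 2 ^ s by simp [Int.shiftLeft_eq]]
    calc (2 : Int) = 2 ^ 1 := by ring
    _ ≤ 2 ^ s := by apply pow_le_pow_right₀ (by norm_num) hs1
  rw [show ((N : Int)).toNat = N by omega]
  rw [geom_div _ hr N]
  -- both are the geometric sum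
  rw [show (1 : Int) <<< s = 2 ^ s by simp [Int.shiftLeft_eq]]
  push_cast
  apply Finset.sum_congr rfl
  intro j _
  rw [Nat.mul_comm, pow_mul]

-- ===== VERDICT (by name: the statement is the Claim_ definition above) =====
theorem distribute_bits_spec : Claim_equal_distribute_bits := by
  intro n _ hpre
  obtain ⟨h0, h256⟩ := hpre
  unfold Spec_distribute_bits
  by_cases hz : n = 0
  · subst hz; rfl
  · exact main_pos n (by omega) h256
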